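-- pv_equiv track=rewrite | github.com/Yaxin9Luo/OpenDesign | open_design/agents/claim_graph_extractor.py | _norm_ws_with_mapping
-- ===== SOURCE A (Python) =====
-- def _norm_ws_with_mapping(raw: str) -> tuple[str, list[int]]:
--     """Normalize whitespace + return per-char index mapping back to raw.
--     `mapping[i]` is the index in `raw` that produced `norm[i]`. The
--     mapping lets us locate a normalized hit in the original (unnormalized)
--     text so the returned excerpt preserves the paper's real layout."""
--     out_chars: list[str] = []
--     mapping: list[int] = []
--     in_ws = False
--     started = False
--     for i, ch in enumerate(raw):
--         if ch.isspace():
--             if started and not in_ws: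
--                 out_chars.append(" ")
--                 mapping.append(i)
--                 in_ws = True
--         else:
--             out_chars.append(ch)
--             mapping.append(i)
--             in_ws = False
--             started = True
--     while out_chars and out_chars[-1] == " ":
--         out_chars.pop()
--         mapping.pop()
--     return "".join(out_chars), mapping
-- ===== SOURCE B (Python) =====
-- def _norm_ws_with_mapping(raw: str) -> tuple[str, list[int]]:
--     # Two-pass: collect maximal non-whitespace spans, then assemble output
--     # (one ' ' mapped to the previous token's end index between tokens).
--     spans: list[tuple[int, int]] = []
--     n = len(raw)
--     i = 0
--     while i < n:
--         if raw[i].isspace():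
--             i += 1
--             continue
--         j = i
--         while j < n and not raw[j].isspace():
--             j += 1
--         spans.append((i, j))
--         i = j
--     parts: list[str] = []
--     mapping: list[int] = []
--     prev_end = None
--     for (s, e) in spans:
--         if prev_end is not None:
--             parts.append(" ")
--             mapping.append(prev_end)
--         parts.append(raw[s:e])
--         mapping.extend(range(s, e))
--         prev_end = e
--     return "".join(parts), mapping
-- ===== Notes on version B (the rewrite author's own statement) =====
-- stated objective: alternative
-- what changed: Replaces A's per-character state machine (in_ws/started flags plus a trailing-space pop loop) by a two-pass scheme: first collect maximal non-whitespace spans, then assemble the output from whole token slices with one separator per gap, which makes the trim loop unnecessary.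
import Mathlib
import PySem

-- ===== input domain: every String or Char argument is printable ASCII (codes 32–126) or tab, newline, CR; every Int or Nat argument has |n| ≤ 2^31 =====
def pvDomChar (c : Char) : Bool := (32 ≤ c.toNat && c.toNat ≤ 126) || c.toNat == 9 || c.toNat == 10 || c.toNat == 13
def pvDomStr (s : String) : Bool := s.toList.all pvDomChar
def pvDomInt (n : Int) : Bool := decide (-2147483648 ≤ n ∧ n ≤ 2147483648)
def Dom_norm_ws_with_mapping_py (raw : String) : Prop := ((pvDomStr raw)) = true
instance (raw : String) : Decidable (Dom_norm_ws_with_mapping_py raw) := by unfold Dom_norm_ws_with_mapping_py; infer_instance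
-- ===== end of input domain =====

-- B collects maximal non-whitespace spans first, then assembles output and mapping; alternative decomposition, same cost.

-- ===== PORT A =====
-- the for-loop of A, state (out_chars, mapping, in_ws, started), over enumerated chars
def pvLoopA : List (Nat × Char) → List Char → List Int → Bool → Bool → List Char × List Int
  | [], out, map, _, _ => (out, map)
  | (i, c) :: rest, out, map, in_ws, started =>
    if PySem.Chars.isspace c then
      if started && !in_ws then
        pvLoopA rest (out ++ [' ']) (map ++ [(i : Int)]) true started
      else
        pvLoopA rest out map in_ws started
    else
      pvLoopA rest (out ++ [c]) (map ++ [(i : Int)]) false true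

-- the trailing 'while out_chars and out_chars[-1] == " "' pop loop
def pvPopTrail (out : List Char) (map : List Int) : List Char × List Int :=
  if out.getLast? = some ' ' then pvPopTrail out.dropLast map.dropLast
  else (out, map)
termination_by out.length
decreasing_by
  have hne : out ≠ [] := by rintro rfl; simp at *
  have := List.length_pos_iff.mpr hne
  simp [List.length_dropLast]; omega

def pvEnumFrom (i : Nat) : List Char → List (Nat × Char)
  | [] => []
  | c :: cs => (i, c) :: pvEnumFrom (i + 1) cs

def norm_ws_with_mapping_py (raw : String) : String × List Int :=
  let (out, map) := pvLoopA (pvEnumFrom 0 raw.toList) [] [] false false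
  let (out, map) := pvPopTrail out map
  (String.ofList out, map)

-- ===== PORT B =====
-- first pass: maximal non-whitespace spans (start, end); the inner while is the takeWhile run
def pvSpans (l : List Char) (i : Nat) : List (Nat × Nat) :=
  match l with
  | [] => []
  | c :: rest =>
    if PySem.Chars.isspace c then pvSpans rest (i + 1)
    else
      let k := ((c :: rest).takeWhile (fun d => !PySem.Chars.isspace d)).length
      (i, i + k) :: pvSpans ((c :: rest).drop k) (i + k)
termination_by l.length
decreasing_by
  · simp
  · have hk : 0 < ((c :: rest).takeWhile (fun d => !PySem.Chars.isspace d)).length := by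
      simp_all
    have hle := (List.takeWhile_prefix (l := c :: rest) (fun d => !PySem.Chars.isspace d)).length_le
    simp only [List.length_drop]; omega

-- second pass: emit one ' ' mapped to prev_end before each token except the first,
-- then the token's chars (raw[s:e], exact here since 0 ≤ s ≤ e) with their raw indices
def pvAssemble (r : List Char) : List (Nat × Nat) → Option Nat → List Char → List Int → List Char × List Int
  | [], _, parts, map => (parts, map)
  | (s, e) :: rest, prev, parts, map =>
    let (parts, map) :=
      match prev with
      | some p => (parts ++ [' '], map ++ [(p : Int)])
      | none => (parts, map)
    pvAssemble r rest (some e) (parts ++ (r.drop s).take (e - s))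
      (map ++ (List.range' s (e - s)).map (Int.ofNat))

def norm_ws_with_mapping_py_alt (raw : String) : String × List Int :=
  let sp := pvSpans raw.toList 0
  let (parts, map) := pvAssemble raw.toList sp none [] []
  (String.ofList parts, map)

-- ===== PRECONDITION & SPEC =====
def Spec_norm_ws_with_mapping_py (raw : String) (out : String × List Int) : Prop := out = norm_ws_with_mapping_py_alt raw
instance (raw : String) (out : String × List Int) : Decidable (Spec_norm_ws_with_mapping_py raw out) := by unfold Spec_norm_ws_with_mapping_py; infer_instance

-- ===== CLAIM (what is proved, stated in full; the proofs are below) =====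
def Claim_equal_norm_ws_with_mapping_py : Prop := ∀ (raw : String), Dom_norm_ws_with_mapping_py raw → Spec_norm_ws_with_mapping_py raw (norm_ws_with_mapping_py raw)

-- ===== LEMMAS AND PROOFS =====

-- abbreviation used throughout: the trailing fragment A's loop leaves behind (one pending ' ')
def pvTrail (S : List (Nat × Nat)) (p : Nat) (len : Nat) : List Char × List Int :=
  match S.getLast? with
  | none => ([' '], [(p : Int)])
  | some (_, e) => if e < len then ([' '], [(e : Int)]) else ([], [])

def pvTrail0 (S : List (Nat × Nat)) (len : Nat) : List Char × List Int :=
  match S.getLast? with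
  | none => ([], [])
  | some (_, e) => if e < len then ([' '], [(e : Int)]) else ([], [])

theorem pvEnumFrom_append (a b : List Char) : ∀ i, pvEnumFrom i (a ++ b) = pvEnumFrom i a ++ pvEnumFrom (i + a.length) b := by
  induction a with
  | nil => simp [pvEnumFrom]
  | cons c cs ih => intro i; simp [pvEnumFrom, ih (i+1)]; ring_nf

theorem pvSpans_nil (i : Nat) : pvSpans [] i = [] := by
  simp [pvSpans]

theorem pvSpans_cons_ws {c : Char} (rest : List Char) (i : Nat) (h : PySem.Chars.isspace c = true) :
    pvSpans (c :: rest) i = pvSpans rest (i + 1) := by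
  rw [pvSpans]; simp [h]

theorem pvSpans_cons_tok {c : Char} (rest : List Char) (i : Nat) (h : PySem.Chars.isspace c = false) :
    pvSpans (c :: rest) i =
      (i, i + ((c :: rest).takeWhile (fun d => !PySem.Chars.isspace d)).length) ::
        pvSpans ((c :: rest).drop ((c :: rest).takeWhile (fun d => !PySem.Chars.isspace d)).length)
          (i + ((c :: rest).takeWhile (fun d => !PySem.Chars.isspace d)).length) := by
  rw [pvSpans]; simp [h]

-- processing a run of non-space chars appends them and their indices, flags stay (false, true)
theorem pvLoopA_tok (t : List Char) : ∀ (restE : List (Nat × Char)) (i : Nat) (out : List Char) (map : List Int),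
    (∀ c ∈ t, PySem.Chars.isspace c = false) →
    pvLoopA (pvEnumFrom i t ++ restE) out map false true
      = pvLoopA restE (out ++ t) (map ++ (List.range' i t.length).map Int.ofNat) false true := by
  induction t with
  | nil => simp [pvEnumFrom]
  | cons c cs ih =>
    intro restE i out map h
    have hc : PySem.Chars.isspace c = false := h c (by simp)
    simp only [pvEnumFrom, List.cons_append, pvLoopA, hc, Bool.false_eq_true, if_false]
    rw [ih restE (i+1) (out ++ [c]) (map ++ [(i : Int)]) (fun d hd => h d (by simp [hd]))]
    simp [List.range'_succ]

theorem pvPopTrail_stop (o : List Char) (m : List Int) (h : o.getLast? ≠ some ' ') :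
    pvPopTrail o m = (o, m) := by
  rw [pvPopTrail]; simp [h]

theorem pvPopTrail_pop (o : List Char) (m : List Int) (x : Int) :
    pvPopTrail (o ++ [' ']) (m ++ [x]) = pvPopTrail o m := by
  rw [pvPopTrail]; simp

-- every span of pvSpans names a nonempty all-non-space token of r
theorem pvDrop_succ (r : List Char) (i : Nat) {c : Char} {rest : List Char} (hd : r.drop i = c :: rest) :
    r.drop (i + 1) = rest := by
  rw [← List.drop_drop, hd]; rfl

theorem pvDropWhile_head (p : Char → Bool) : ∀ (l : List Char) (c : Char) (rest : List Char),
    l.dropWhile p = c :: rest → p c = false := by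
  intro l
  induction l with
  | nil => intro c rest h; simp [List.dropWhile] at h
  | cons a l ih =>
    intro c rest h
    by_cases ha : p a = true
    · exact ih c rest (by simpa [List.dropWhile, ha] using h)
    · rw [List.dropWhile_cons_of_neg (by simpa using ha)] at h
      cases h; simpa using ha

theorem pvSpans_tok_prop (r : List Char) : ∀ n i, r.length - i = n → ∀ s e, (s, e) ∈ pvSpans (r.drop i) i →
    ((r.drop s).take (e - s)) ≠ [] ∧ ∀ c ∈ (r.drop s).take (e - s), PySem.Chars.isspace c = false := by
  intro n
  induction n using Nat.strong_induction_on with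
  | _ n ih =>
    intro i hn s e hmem
    match hd : r.drop i with
    | [] => rw [hd, pvSpans_nil] at hmem; simp at hmem
    | c :: rest =>
      have hil : i < r.length := by
        by_contra h
        have : r.drop i = [] := List.drop_eq_nil_of_le (by omega)
        simp [this] at hd
      have hrest : r.drop (i + 1) = rest := pvDrop_succ r i hd
      by_cases hc : PySem.Chars.isspace c = true
      · rw [hd, pvSpans_cons_ws rest i hc, ← hrest] at hmem
        exact ih (r.length - (i+1)) (by omega) (i+1) rfl s e hmem
      · have hc' : PySem.Chars.isspace c = false := by simpa using hc
        rw [hd, pvSpans_cons_tok rest i hc'] at hmem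
        have hkpos : 0 < ((c :: rest).takeWhile (fun d => !PySem.Chars.isspace d)).length := by
          simp [hc']
        have hklen : ((c :: rest).takeWhile (fun d => !PySem.Chars.isspace d)).length ≤ (c :: rest).length :=
          (List.takeWhile_prefix _).length_le
        have hdropk : (c :: rest).drop ((c :: rest).takeWhile (fun d => !PySem.Chars.isspace d)).length
            = r.drop (i + ((c :: rest).takeWhile (fun d => !PySem.Chars.isspace d)).length) := by
          rw [← hd, List.drop_drop]
        rcases List.mem_cons.1 hmem with heq | htail
        · obtain ⟨hs, he⟩ : s = i ∧ e = i + ((c :: rest).takeWhile (fun d => !PySem.Chars.isspace d)).length := by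
            exact ⟨congrArg Prod.fst heq, congrArg Prod.snd heq⟩
          subst hs he
          have htake : (r.drop s).take ((c :: rest).takeWhile (fun d => !PySem.Chars.isspace d)).length
              = (c :: rest).takeWhile (fun d => !PySem.Chars.isspace d) := by
            rw [hd]; exact ((List.prefix_iff_eq_take).1 (List.takeWhile_prefix _)).symm
          constructor
          · rw [show s + ((c :: rest).takeWhile (fun d => !PySem.Chars.isspace d)).length - s
                = ((c :: rest).takeWhile (fun d => !PySem.Chars.isspace d)).length by omega, htake]
            intro hnil; rw [hnil] at hkpos; simp at hkpos
          · intro x hx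
            rw [show s + ((c :: rest).takeWhile (fun d => !PySem.Chars.isspace d)).length - s
                = ((c :: rest).takeWhile (fun d => !PySem.Chars.isspace d)).length by omega, htake] at hx
            have := List.mem_takeWhile_imp hx
            simpa using this
        · rw [hdropk] at htail
          have hlen : (c :: rest).length = r.length - i := by rw [← hd]; simp
          exact ih (r.length - (i + ((c :: rest).takeWhile (fun d => !PySem.Chars.isspace d)).length))
            (by omega) _ rfl s e htail

-- the assembled output ends with a non-space char when spans are nonempty and name real tokens
theorem pvAssemble_last (r : List Char) : ∀ (S : List (Nat × Nat)) (prev : Option Nat) (parts : List Char) (map : List Int),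
    (∀ se ∈ S, (r.drop se.1).take (se.2 - se.1) ≠ [] ∧ ∀ c ∈ (r.drop se.1).take (se.2 - se.1), PySem.Chars.isspace c = false) →
    S ≠ [] →
    ∃ c, ((pvAssemble r S prev parts map).1).getLast? = some c ∧ PySem.Chars.isspace c = false := by
  intro S
  induction S with
  | nil => intro _ _ _ _ h; exact absurd rfl h
  | cons a S ih =>
    intro prev parts map hprop _
    obtain ⟨s, e⟩ := a
    have htok := hprop (s, e) (by simp)
    cases S with
    | nil =>
      obtain ⟨c, hc⟩ : ∃ c, ((r.drop s).take (e - s)).getLast? = some c := by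
        cases h : ((r.drop s).take (e - s)).getLast? with
        | none => exact absurd (List.getLast?_eq_none_iff.1 h) htok.1
        | some c => exact ⟨c, rfl⟩
      have key : ∀ xs : List Char, ((xs ++ (r.drop s).take (e - s)).getLast?) = some c := by
        intro xs; rw [List.getLast?_append_of_ne_nil _ htok.1, hc]
      refine ⟨c, ?_, htok.2 c (List.mem_of_getLast? hc)⟩
      cases prev <;> · simp only [pvAssemble]; exact key _
    | cons b S' =>
      have := ih (some e) ((match prev with
          | some p => (parts ++ [' '], map ++ [(p : Int)])
          | none => (parts, map)).1 ++ (r.drop s).take (e - s))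
        ((match prev with
          | some p => (parts ++ [' '], map ++ [(p : Int)])
          | none => (parts, map)).2 ++ (List.range' s (e - s)).map Int.ofNat)
        (fun se hse => hprop se (by simp [hse])) (by simp)
      cases prev <;> simpa [pvAssemble] using this

-- core invariant, state (in_ws := true, started := true) with pending separator index p
theorem pvCore2 (r : List Char) : ∀ (n i : Nat) (out : List Char) (map : List Int) (p : Nat), r.length - i = n → i ≤ r.length →
    pvLoopA (pvEnumFrom i (r.drop i)) (out ++ [' ']) (map ++ [(p : Int)]) true true
      = ((pvAssemble r (pvSpans (r.drop i) i) (some p) out map).1 ++ (pvTrail (pvSpans (r.drop i) i) p r.length).1,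
         (pvAssemble r (pvSpans (r.drop i) i) (some p) out map).2 ++ (pvTrail (pvSpans (r.drop i) i) p r.length).2) := by
  intro n
  induction n using Nat.strong_induction_on with
  | _ n ih =>
    intro i out map p hn hil
    match hd : r.drop i with
    | [] =>
      simp [pvEnumFrom, pvLoopA, pvSpans_nil, pvAssemble, pvTrail]
    | c :: rest =>
      have hilt : i < r.length := by
        by_contra h
        have : r.drop i = [] := List.drop_eq_nil_of_le (by omega)
        simp [this] at hd
      have hrest : r.drop (i + 1) = rest := pvDrop_succ r i hd
      by_cases hc : PySem.Chars.isspace c = true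
      · rw [pvSpans_cons_ws rest i hc, ← hrest]
        simp only [pvEnumFrom, pvLoopA, hc, if_pos, Bool.not_true, Bool.and_false,
          Bool.false_eq_true, if_false]
        exact ih (r.length - (i+1)) (by omega) (i+1) out map p rfl (by omega)
      · have hc' : PySem.Chars.isspace c = false := by simpa using hc
        set t := (c :: rest).takeWhile (fun d => !PySem.Chars.isspace d) with ht
        have ht'' : t = c :: rest.takeWhile (fun d => !PySem.Chars.isspace d) := by
          rw [ht, List.takeWhile_cons]; simp [hc']
        have htmem : ∀ d ∈ t, PySem.Chars.isspace d = false := by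
          intro d hdm
          have := List.mem_takeWhile_imp (ht ▸ hdm)
          simpa using this
        have hkpos : 0 < t.length := by rw [ht'']; simp
        have hklen : t.length ≤ rest.length + 1 := by
          have := (List.takeWhile_prefix (l := c :: rest) (fun d => !PySem.Chars.isspace d)).length_le
          simpa [ht] using this
        have hlend : rest.length + 1 = r.length - i := by
          have : (r.drop i).length = r.length - i := by simp
          rw [hd] at this; simpa using this
        have htake : (c :: rest).take t.length = t :=
          (List.prefix_iff_eq_take.1 (ht ▸ List.takeWhile_prefix _)).symm
        have hdropk : (c :: rest).drop t.length = r.drop (i + t.length) := by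
          rw [← hd, List.drop_drop]
        have hsplit : c :: rest = t ++ r.drop (i + t.length) := by
          have h0 := List.take_append_drop t.length (c :: rest)
          rw [htake] at h0
          rw [← hdropk]
          exact h0.symm
        have hilen2 : i + t.length ≤ r.length := by omega
        -- LHS: first char of the token, then the run t', reaching state (false, true)
        rw [hsplit, pvEnumFrom_append]
        rw [show pvEnumFrom i t = (i, c) :: pvEnumFrom (i+1) (rest.takeWhile (fun d => !PySem.Chars.isspace d)) by
          rw [ht'']; rfl]
        simp only [List.cons_append, pvLoopA, hc', Bool.false_eq_true, if_false]
        rw [pvLoopA_tok _ _ (i+1) _ _ (fun d hdm => htmem d (by rw [ht'']; exact List.mem_cons_of_mem _ hdm))]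
        -- RHS: expose the head span
        rw [← hsplit, pvSpans_cons_tok rest i hc', ← ht, hdropk]
        match h2 : r.drop (i + t.length) with
        | [] =>
          have hend : i + t.length = r.length := by
            have : (r.drop (i + t.length)).length = r.length - (i + t.length) := by simp
            rw [h2] at this; simp at this; omega
          rw [pvSpans_nil]
          simp only [pvEnumFrom, pvLoopA, pvAssemble, pvTrail, Nat.add_sub_cancel_left,
            List.getLast?_singleton]
          rw [if_neg (by omega)]
          rw [show (r.drop i).take t.length = t by rw [hd, htake]]
          refine Prod.ext ?_ ?_
          · simp [ht'', List.append_assoc]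
          · simp [ht'', List.append_assoc, List.range'_succ]
        | c' :: rest' =>
          have hlt2 : i + t.length < r.length := by
            by_contra h
            have : r.drop (i + t.length) = [] := List.drop_eq_nil_of_le (by omega)
            simp [this] at h2
          have hrest2 : r.drop (i + t.length + 1) = rest' := pvDrop_succ r (i + t.length) h2
          have hdw : (c :: rest).dropWhile (fun d => !PySem.Chars.isspace d) = (c :: rest).drop t.length := by
            have h1 : t ++ (c :: rest).dropWhile (fun d => !PySem.Chars.isspace d) = c :: rest := by
              rw [ht]; exact List.takeWhile_append_dropWhile
            have h2' : t ++ (c :: rest).drop t.length = c :: rest := by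
              conv_rhs => rw [← List.take_append_drop t.length (c :: rest)]
              rw [htake]
            exact List.append_cancel_left (h1.trans h2'.symm)
          have hc2 : PySem.Chars.isspace c' = true := by
            have := pvDropWhile_head (fun d => !PySem.Chars.isspace d) (c :: rest) c' rest'
              (by rw [hdw, hdropk, h2])
            simpa using this
          -- LHS: the loop sees the space at i + t.length, emits the pending separator
          simp only [pvEnumFrom, pvLoopA, hc2, if_pos, Bool.not_false, Bool.and_self]
          -- RHS: skip the space in the span scan
          rw [pvSpans_cons_ws rest' (i + t.length) hc2]
          rw [← hrest2]
          rw [ih (r.length - (i + t.length + 1)) (by omega) (i + t.length + 1) _ _ (i + t.length) rfl (by omega)]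
          simp only [pvAssemble, Nat.add_sub_cancel_left]
          rw [show (r.drop i).take t.length = t by rw [hd, htake]]
          -- trail of (head :: S) equals trail of S with pending i + t.length
          have htr : pvTrail ((i, i + t.length) :: pvSpans (r.drop (i + t.length + 1)) (i + t.length + 1)) p r.length
              = pvTrail (pvSpans (r.drop (i + t.length + 1)) (i + t.length + 1)) (i + t.length) r.length := by
            match hS : pvSpans (r.drop (i + t.length + 1)) (i + t.length + 1) with
            | [] => simp [pvTrail, hlt2]
            | x :: xs =>
              cases hxl : (x :: xs).getLast? with
              | none => simp at hxl
              | some y =>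
                obtain ⟨a, e⟩ := y
                simp [pvTrail, List.getLast?_cons_cons, hxl]
          rw [htr]
          simp only [ht'', List.length_cons]
          rw [show List.range' i ((List.takeWhile (fun d => !PySem.Chars.isspace d) rest).length + 1)
              = i :: List.range' (i+1) ((List.takeWhile (fun d => !PySem.Chars.isspace d) rest).length) from rfl]
          simp [List.append_assoc]

-- initial state (started := false)
theorem pvTop (r : List Char) : ∀ n i out map, r.length - i = n → i ≤ r.length →
    pvLoopA (pvEnumFrom i (r.drop i)) out map false false
      = ((pvAssemble r (pvSpans (r.drop i) i) none out map).1 ++ (pvTrail0 (pvSpans (r.drop i) i) r.length).1,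
         (pvAssemble r (pvSpans (r.drop i) i) none out map).2 ++ (pvTrail0 (pvSpans (r.drop i) i) r.length).2) := by
  intro n
  induction n using Nat.strong_induction_on with
  | _ n ih =>
    intro i out map hn hil
    match hd : r.drop i with
    | [] =>
      simp [pvEnumFrom, pvLoopA, pvSpans_nil, pvAssemble, pvTrail0]
    | c :: rest =>
      have hilt : i < r.length := by
        by_contra h
        have : r.drop i = [] := List.drop_eq_nil_of_le (by omega)
        simp [this] at hd
      have hrest : r.drop (i + 1) = rest := pvDrop_succ r i hd
      by_cases hc : PySem.Chars.isspace c = true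
      · rw [pvSpans_cons_ws rest i hc, ← hrest]
        simp only [pvEnumFrom, pvLoopA, hc, if_pos, Bool.false_and, Bool.false_eq_true, if_false]
        exact ih (r.length - (i+1)) (by omega) (i+1) out map rfl (by omega)
      · have hc' : PySem.Chars.isspace c = false := by simpa using hc
        set t := (c :: rest).takeWhile (fun d => !PySem.Chars.isspace d) with ht
        have ht'' : t = c :: rest.takeWhile (fun d => !PySem.Chars.isspace d) := by
          rw [ht, List.takeWhile_cons]; simp [hc']
        have htmem : ∀ d ∈ t, PySem.Chars.isspace d = false := by
          intro d hdm
          have := List.mem_takeWhile_imp (ht ▸ hdm)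
          simpa using this
        have hkpos : 0 < t.length := by rw [ht'']; simp
        have hklen : t.length ≤ rest.length + 1 := by
          have := (List.takeWhile_prefix (l := c :: rest) (fun d => !PySem.Chars.isspace d)).length_le
          simpa [ht] using this
        have hlend : rest.length + 1 = r.length - i := by
          have : (r.drop i).length = r.length - i := by simp
          rw [hd] at this; simpa using this
        have htake : (c :: rest).take t.length = t :=
          (List.prefix_iff_eq_take.1 (ht ▸ List.takeWhile_prefix _)).symm
        have hdropk : (c :: rest).drop t.length = r.drop (i + t.length) := by
          rw [← hd, List.drop_drop]
        have hsplit : c :: rest = t ++ r.drop (i + t.length) := by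
          have h0 := List.take_append_drop t.length (c :: rest)
          rw [htake] at h0
          rw [← hdropk]
          exact h0.symm
        have hilen2 : i + t.length ≤ r.length := by omega
        rw [hsplit, pvEnumFrom_append]
        rw [show pvEnumFrom i t = (i, c) :: pvEnumFrom (i+1) (rest.takeWhile (fun d => !PySem.Chars.isspace d)) by
          rw [ht'']; rfl]
        simp only [List.cons_append, pvLoopA, hc', Bool.false_eq_true, if_false]
        rw [pvLoopA_tok _ _ (i+1) _ _ (fun d hdm => htmem d (by rw [ht'']; exact List.mem_cons_of_mem _ hdm))]
        rw [← hsplit, pvSpans_cons_tok rest i hc', ← ht, hdropk]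
        match h2 : r.drop (i + t.length) with
        | [] =>
          have hend : i + t.length = r.length := by
            have : (r.drop (i + t.length)).length = r.length - (i + t.length) := by simp
            rw [h2] at this; simp at this; omega
          rw [pvSpans_nil]
          simp only [pvEnumFrom, pvLoopA, pvAssemble, pvTrail0, Nat.add_sub_cancel_left,
            List.getLast?_singleton]
          rw [if_neg (by omega)]
          rw [show (r.drop i).take t.length = t by rw [hd, htake]]
          refine Prod.ext ?_ ?_
          · simp [ht'', List.append_assoc]
          · simp [ht'', List.append_assoc, List.range'_succ]
        | c' :: rest' =>
          have hlt2 : i + t.length < r.length := by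
            by_contra h
            have : r.drop (i + t.length) = [] := List.drop_eq_nil_of_le (by omega)
            simp [this] at h2
          have hrest2 : r.drop (i + t.length + 1) = rest' := pvDrop_succ r (i + t.length) h2
          have hdw : (c :: rest).dropWhile (fun d => !PySem.Chars.isspace d) = (c :: rest).drop t.length := by
            have h1 : t ++ (c :: rest).dropWhile (fun d => !PySem.Chars.isspace d) = c :: rest := by
              rw [ht]; exact List.takeWhile_append_dropWhile
            have h2' : t ++ (c :: rest).drop t.length = c :: rest := by
              conv_rhs => rw [← List.take_append_drop t.length (c :: rest)]
              rw [htake]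
            exact List.append_cancel_left (h1.trans h2'.symm)
          have hc2 : PySem.Chars.isspace c' = true := by
            have := pvDropWhile_head (fun d => !PySem.Chars.isspace d) (c :: rest) c' rest'
              (by rw [hdw, hdropk, h2])
            simpa using this
          simp only [pvEnumFrom, pvLoopA, hc2, if_pos, Bool.not_false, Bool.and_self]
          rw [pvSpans_cons_ws rest' (i + t.length) hc2]
          rw [← hrest2]
          rw [pvCore2 r (r.length - (i + t.length + 1)) (i + t.length + 1) _ _ (i + t.length) rfl (by omega)]
          simp only [pvAssemble, Nat.add_sub_cancel_left]
          rw [show (r.drop i).take t.length = t by rw [hd, htake]]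
          have htr : pvTrail0 ((i, i + t.length) :: pvSpans (r.drop (i + t.length + 1)) (i + t.length + 1)) r.length
              = pvTrail (pvSpans (r.drop (i + t.length + 1)) (i + t.length + 1)) (i + t.length) r.length := by
            match hS : pvSpans (r.drop (i + t.length + 1)) (i + t.length + 1) with
            | [] => simp [pvTrail0, pvTrail, hlt2]
            | x :: xs =>
              cases hxl : (x :: xs).getLast? with
              | none => simp at hxl
              | some y =>
                obtain ⟨a, e⟩ := y
                simp [pvTrail0, pvTrail, List.getLast?_cons_cons, hxl]
          rw [htr]
          simp only [ht'', List.length_cons]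
          rw [show List.range' i ((List.takeWhile (fun d => !PySem.Chars.isspace d) rest).length + 1)
              = i :: List.range' (i+1) ((List.takeWhile (fun d => !PySem.Chars.isspace d) rest).length) from rfl]
          simp [List.append_assoc]

-- ===== VERDICT (by name: the statement is the Claim_ definition above) =====
theorem norm_ws_with_mapping_py_spec : Claim_equal_norm_ws_with_mapping_py := by
  intro raw _
  unfold Spec_norm_ws_with_mapping_py norm_ws_with_mapping_py norm_ws_with_mapping_py_alt
  have htop := pvTop raw.toList raw.toList.length 0 [] [] rfl (by omega)
  rw [List.drop_zero] at htop
  rw [htop]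
  match hS : pvSpans raw.toList 0 with
  | [] =>
    simp [pvAssemble, pvTrail0, pvPopTrail_stop]
  | x :: xs =>
    have hprop : ∀ se ∈ x :: xs, (raw.toList.drop se.1).take (se.2 - se.1) ≠ [] ∧
        ∀ c ∈ (raw.toList.drop se.1).take (se.2 - se.1), PySem.Chars.isspace c = false := by
      intro se hse
      exact pvSpans_tok_prop raw.toList raw.toList.length 0 rfl se.1 se.2
        (by rw [List.drop_zero, hS]; exact hse)
    obtain ⟨ch, hlast, hns⟩ := pvAssemble_last raw.toList (x :: xs) none [] [] hprop (by simp)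
    rcases hA : pvAssemble raw.toList (x :: xs) none [] [] with ⟨o, m⟩
    rw [hA] at hlast
    have hchne : o.getLast? ≠ some ' ' := by
      rw [hlast]
      intro h
      have hc : ch = ' ' := by injection h
      rw [hc] at hns
      simp [show PySem.Chars.isspace ' ' = true from by decide] at hns
    have hstop := pvPopTrail_stop o m hchne
    simp only [hA]
    cases hxl : (x :: xs).getLast? with
    | none => simp at hxl
    | some y =>
      obtain ⟨a, e⟩ := y
      by_cases he : e < raw.toList.length
      · rw [show pvTrail0 (x :: xs) raw.toList.length = ([' '], [(e : Int)]) by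
          simp only [pvTrail0, hxl]; rw [if_pos (by simpa using he)]]
        simp [pvPopTrail_pop, hstop]
      · rw [show pvTrail0 (x :: xs) raw.toList.length = ([], []) by
          simp only [pvTrail0, hxl]; rw [if_neg (by simpa using he)]]
        simp [hstop]
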